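-- pv_equiv track=rewrite | github.com/GaryOderNichts/angle | scripts/gen_gl_enum_utils.py | dump_value_to_string_mapping
-- ===== SOURCE A (Python) =====
-- template_enum_group_case = """case {api_enum}::{group_name}: {{
--     switch (value) {{
--         {inner_group_cases}
--         default:
--             return UnknownEnumToString(value);
--     }}
-- }}
-- """
--
-- template_enum_value_to_string_case = """case {value}: return {name};"""
--
-- def dump_value_to_string_mapping(enum_groups, api_enum):
--     exporting_groups = list()
--     for group_name, inner_mapping in enum_groups.items():
--         # Convert to pairs and strip out-of-range values.
--         string_value_pairs = list(
--             filter(lambda x: x[1] >= 0 and x[1] <= 0xFFFFFFFFF, inner_mapping.items()))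
--         if not string_value_pairs:
--             continue
--
--         # sort according values
--         string_value_pairs.sort(key=lambda x: (x[1], len(x[0]), x[0]))
--
--         # remove all duplicate values from the pairs list
--         # some value may have more than one GLenum mapped to them, such as:
--         #     GL_DRAW_FRAMEBUFFER_BINDING and GL_FRAMEBUFFER_BINDING
--         #     GL_BLEND_EQUATION_RGB and GL_BLEND_EQUATION
--         # it is safe to output either one of them, for simplity here just
--         # choose the shorter one which comes first in the sorted list
--         exporting_string_value_pairs = list()
--         for index, pair in enumerate(string_value_pairs):
--             if index == 0 or pair[1] != string_value_pairs[index - 1][1]: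
--                 exporting_string_value_pairs.append(pair)
--
--         inner_code_block = "\n".join([
--             template_enum_value_to_string_case.format(
--                 value='0x%X' % value,
--                 name='"%s"' % name,
--             ) for name, value in exporting_string_value_pairs
--         ])
--
--         exporting_groups.append((group_name, inner_code_block))
--
--     return "\n".join([
--         template_enum_group_case.format(
--             api_enum=api_enum,
--             group_name=group_name,
--             inner_group_cases=inner_code_block,
--         ) for group_name, inner_code_block in sorted(exporting_groups, key=lambda x: x[0])
--     ])
-- ===== SOURCE B (Python) =====
-- template_enum_group_case = """case {api_enum}::{group_name}: {{
--     switch (value) {{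
--         {inner_group_cases}
--         default:
--             return UnknownEnumToString(value);
--     }}
-- }}
-- """
--
-- template_enum_value_to_string_case = """case {value}: return {name};"""
--
--
-- def dump_value_to_string_mapping(enum_groups, api_enum):
--     # One pass per group: a dict value -> best name (smallest (len, name)),
--     # groups visited in sorted-name order so output parts need no final sort.
--     parts = []
--     for group_name, inner_mapping in sorted(enum_groups.items(), key=lambda x: x[0]):
--         best = {}
--         for name, value in inner_mapping.items():
--             if 0 <= value <= 0xFFFFFFFFF:
--                 cur = best.get(value)
--                 if cur is None or (len(name), name) < (len(cur), cur):
--                     best[value] = name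
--         if not best:
--             continue
--         inner_group_cases = "\n".join(
--             template_enum_value_to_string_case.format(
--                 value='0x%X' % value,
--                 name='"%s"' % best[value],
--             ) for value in sorted(best))
--         parts.append(template_enum_group_case.format(
--             api_enum=api_enum,
--             group_name=group_name,
--             inner_group_cases=inner_group_cases,
--         ))
--     return "\n".join(parts)
-- ===== Notes on version B (the rewrite author's own statement) =====
-- stated objective: alternative
-- what changed: Per group, A sorts all pairs by (value, len(name), name) and then drops adjacent duplicate values; B makes one pass building a value->name dict that keeps the (len(name), name)-smallest name per value, then sorts the (unique) values, and it iterates groups in sorted order instead of sorting the collected results afterwards.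
import Mathlib
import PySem

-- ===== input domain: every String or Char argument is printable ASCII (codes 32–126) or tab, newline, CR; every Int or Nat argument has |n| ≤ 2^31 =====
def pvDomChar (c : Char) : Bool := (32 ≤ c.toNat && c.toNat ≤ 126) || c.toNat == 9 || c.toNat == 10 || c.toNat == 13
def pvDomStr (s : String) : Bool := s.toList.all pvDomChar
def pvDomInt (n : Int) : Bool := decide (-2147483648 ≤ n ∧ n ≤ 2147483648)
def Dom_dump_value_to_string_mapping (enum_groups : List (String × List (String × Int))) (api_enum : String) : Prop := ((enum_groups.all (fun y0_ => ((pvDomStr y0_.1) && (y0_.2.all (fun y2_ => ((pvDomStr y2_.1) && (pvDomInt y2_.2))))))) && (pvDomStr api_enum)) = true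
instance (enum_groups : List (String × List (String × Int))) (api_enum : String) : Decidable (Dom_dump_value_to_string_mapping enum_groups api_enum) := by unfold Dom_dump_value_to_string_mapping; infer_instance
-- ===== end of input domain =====

-- B replaces A's per-group sort + adjacent-duplicate scan by a single pass building a
-- value→best-name dict (keeping the (len,name)-smallest name) and visits groups in sorted order.

-- shared module-level material (the Python module's two templates and '0x%X' formatting)
def pvHexDigit (d : Nat) : Char := if d < 10 then Char.ofNat (48 + d) else Char.ofNat (55 + d)

def pvHexCore (n : Nat) : List Char :=
  if h : n = 0 then [] else pvHexCore (n / 16) ++ [pvHexDigit (n % 16)]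
decreasing_by exact Nat.div_lt_self (Nat.pos_of_ne_zero h) (by norm_num)

def pvHex (v : Int) : String := if v = 0 then "0" else String.mk (pvHexCore v.toNat)

def pvValueCase (value name : String) : String :=
  "case " ++ value ++ ": return " ++ name ++ ";"

def pvGroupCase (api g inner : String) : String :=
  "case " ++ api ++ "::" ++ g ++ ": {\n    switch (value) {\n        " ++ inner ++
  "\n        default:\n            return UnknownEnumToString(value);\n    }\n}\n"

def pvInRange (v : Int) : Bool := decide (0 ≤ v) && decide (v ≤ 0xFFFFFFFFF)

-- Python tuple key (len(name), name)
def pvKey2 (n : String) : Lex (Int × String) := toLex (PySem.Str.len n, n)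

-- ===== PORT A =====
def pvDedupGo (prev : String × Int) : List (String × Int) → List (String × Int)
  | [] => []
  | q :: t => if q.2 ≠ prev.2 then q :: pvDedupGo q t else pvDedupGo q t

def pvDedupAdj : List (String × Int) → List (String × Int)
  | [] => []
  | p :: t => p :: pvDedupGo p t

def dump_value_to_string_mapping (enum_groups : List (String × List (String × Int))) (api_enum : String) : String :=
  let exporting_groups :=
    (PySem.Dict.ofList enum_groups).items.foldl (fun acc gi =>
      let string_value_pairs := (PySem.Dict.ofList gi.2).items.filter (fun x => pvInRange x.2)
      if string_value_pairs = [] then acc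
      else
        acc ++ [(gi.1, PySem.Str.join "\n"
          ((pvDedupAdj (PySem.List.sorted string_value_pairs (fun x => toLex (x.2, pvKey2 x.1)) false)).map
            (fun p => pvValueCase ("0x" ++ pvHex p.2) ("\"" ++ p.1 ++ "\""))))]) []
  PySem.Str.join "\n"
    ((PySem.List.sorted exporting_groups (fun x => x.1) false).map
      (fun p => pvGroupCase api_enum p.1 p.2))

-- ===== PORT B =====
def dump_value_to_string_mapping_alt (enum_groups : List (String × List (String × Int))) (api_enum : String) : String :=
  PySem.Str.join "\n"
    ((PySem.List.sorted (PySem.Dict.ofList enum_groups).items (fun x => x.1) false).foldl (fun parts gi =>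
      let best := (PySem.Dict.ofList gi.2).items.foldl (fun best p =>
        if pvInRange p.2 then
          match best.get? p.2 with
          | none => best.insert p.2 p.1
          | some cur => if pvKey2 p.1 < pvKey2 cur then best.insert p.2 p.1 else best
        else best) PySem.Dict.empty
      if best.items = [] then parts
      else parts ++ [pvGroupCase api_enum gi.1 (PySem.Str.join "\n"
        ((PySem.List.sorted best.keys (fun v => v) false).map
          (fun v => pvValueCase ("0x" ++ pvHex v) ("\"" ++ best.getD v "" ++ "\""))))]) [])

-- ===== PRECONDITION & SPEC =====
def Spec_dump_value_to_string_mapping (enum_groups : List (String × List (String × Int))) (api_enum : String) (out : String) : Prop := out = dump_value_to_string_mapping_alt enum_groups api_enum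
instance (enum_groups : List (String × List (String × Int))) (api_enum : String) (out : String) : Decidable (Spec_dump_value_to_string_mapping enum_groups api_enum out) := by unfold Spec_dump_value_to_string_mapping; infer_instance

-- ===== CLAIM (what is proved, stated in full; the proofs are below) =====
def Claim_equal_dump_value_to_string_mapping : Prop := ∀ (enum_groups : List (String × List (String × Int))) (api_enum : String), Dom_dump_value_to_string_mapping enum_groups api_enum → Spec_dump_value_to_string_mapping enum_groups api_enum (dump_value_to_string_mapping enum_groups api_enum)

-- ===== LEMMAS AND PROOFS =====

-- key of A's inner sort
def pvKey3 (p : String × Int) : Lex (Int × Lex (Int × String)) := toLex (p.2, pvKey2 p.1)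

-- the range-filtered inner items of a group
def pvF (lst : List (String × Int)) : List (String × Int) :=
  (PySem.Dict.ofList lst).items.filter (fun x => pvInRange x.2)

def pvFmtCase (p : String × Int) : String := pvValueCase ("0x" ++ pvHex p.2) ("\"" ++ p.1 ++ "\"")

-- what A's loop contributes per group
def pvProcA (gi : String × List (String × Int)) : Option (String × String) :=
  if pvF gi.2 = [] then none
  else some (gi.1, PySem.Str.join "\n"
    ((pvDedupAdj (PySem.List.sorted (pvF gi.2) pvKey3 false)).map pvFmtCase))

-- B's per-group dict
def pvBestStep (best : PySem.Dict Int String) (p : String × Int) : PySem.Dict Int String :=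
  if pvInRange p.2 then
    match best.get? p.2 with
    | none => best.insert p.2 p.1
    | some cur => if pvKey2 p.1 < pvKey2 cur then best.insert p.2 p.1 else best
  else best

def pvBest (lst : List (String × Int)) : PySem.Dict Int String :=
  (PySem.Dict.ofList lst).items.foldl pvBestStep PySem.Dict.empty

-- what B's loop contributes per group
def pvProcB (api : String) (gi : String × List (String × Int)) : Option String :=
  if (pvBest gi.2).items = [] then none
  else some (pvGroupCase api gi.1 (PySem.Str.join "\n"
    ((PySem.List.sorted (pvBest gi.2).keys (fun v => v) false).map
      (fun v => pvValueCase ("0x" ++ pvHex v) ("\"" ++ (pvBest gi.2).getD v "" ++ "\"")))))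

-- running minimum of names with the given value, by (len, name)
def pvMinStep (v : Int) (acc : Option String) (p : String × Int) : Option String :=
  if p.2 = v then
    match acc with
    | none => some p.1
    | some c => if pvKey2 p.1 < pvKey2 c then some p.1 else acc
  else acc

def pvMinF (F : List (String × Int)) (v : Int) : Option String := F.foldl (pvMinStep v) none


lemma pvKey2_inj : Function.Injective pvKey2 := by
  intro a b h
  have h2 := congrArg (fun x => (ofLex x).2) h
  simpa [pvKey2] using h2

lemma pvKey3_snd_le {a b : String × Int} (h : pvKey3 a ≤ pvKey3 b) : a.2 ≤ b.2 := by
  have h' := Prod.Lex.le_iff.mp h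
  simp only [pvKey3, ofLex_toLex] at h'
  rcases h' with h' | ⟨h', _⟩
  · exact le_of_lt h'
  · exact le_of_eq h'

lemma pvKey3_key2_le {a b : String × Int} (h : pvKey3 a ≤ pvKey3 b) (hs : a.2 = b.2) :
    pvKey2 a.1 ≤ pvKey2 b.1 := by
  have h' := Prod.Lex.le_iff.mp h
  simp only [pvKey3, ofLex_toLex] at h'
  rcases h' with h' | ⟨_, h2⟩
  · rw [hs] at h'; exact absurd h' (lt_irrefl _)
  · exact h2

-- ---------- dedup (A side) ----------

lemma mem_dedupGo {p : String × Int} : ∀ {prev : String × Int} {t : List (String × Int)},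
    p ∈ pvDedupGo prev t → p ∈ t := by
  intro prev t
  induction t generalizing prev with
  | nil => intro h; simp [pvDedupGo] at h
  | cons q t ih =>
    intro h
    simp only [pvDedupGo] at h
    split at h
    · rcases List.mem_cons.mp h with h | h
      · exact h ▸ List.mem_cons_self
      · exact List.mem_cons_of_mem _ (ih h)
    · exact List.mem_cons_of_mem _ (ih h)

lemma mem_dedupAdj {p : String × Int} {S : List (String × Int)}
    (h : p ∈ pvDedupAdj S) : p ∈ S := by
  cases S with
  | nil => simp [pvDedupAdj] at h
  | cons a t =>
    simp only [pvDedupAdj] at h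
    rcases List.mem_cons.mp h with h | h
    · exact h ▸ List.mem_cons_self
    · exact List.mem_cons_of_mem _ (mem_dedupGo h)

lemma dedupGo_snd_gt {p : String × Int} : ∀ {prev : String × Int} {t : List (String × Int)},
    List.Pairwise (fun a b => a.2 ≤ b.2) (prev :: t) → p ∈ pvDedupGo prev t → prev.2 < p.2 := by
  intro prev t
  induction t generalizing prev with
  | nil => intro _ h; simp [pvDedupGo] at h
  | cons q t ih =>
    intro hpw h
    rcases List.pairwise_cons.mp hpw with ⟨hprev, hqt⟩
    have hq : prev.2 ≤ q.2 := hprev q List.mem_cons_self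
    have hqt' : List.Pairwise (fun a b : String × Int => a.2 ≤ b.2) (q :: t) := hqt
    simp only [pvDedupGo] at h
    split at h
    · rcases List.mem_cons.mp h with h | h
      · subst h; exact lt_of_le_of_ne hq (by rename_i hne; exact fun he => hne he.symm)
      · exact lt_of_le_of_lt hq (ih hqt' h)
    · rename_i hne
      have he : q.2 = prev.2 := not_not.mp (by simpa using hne)
      have := ih hqt' h
      rw [he] at this
      exact this

lemma dedupGo_pairwise : ∀ {prev : String × Int} {t : List (String × Int)},
    List.Pairwise (fun a b => a.2 ≤ b.2) (prev :: t) →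
    List.Pairwise (fun a b : String × Int => a.2 < b.2) (pvDedupGo prev t) := by
  intro prev t
  induction t generalizing prev with
  | nil => intro _; simp [pvDedupGo]
  | cons q t ih =>
    intro hpw
    rcases List.pairwise_cons.mp hpw with ⟨_, hqt⟩
    simp only [pvDedupGo]
    split
    · exact List.pairwise_cons.mpr ⟨fun b hb => dedupGo_snd_gt hqt hb, ih hqt⟩
    · exact ih hqt

lemma dedupAdj_pairwise {S : List (String × Int)}
    (h : List.Pairwise (fun a b => a.2 ≤ b.2) S) :
    List.Pairwise (fun a b : String × Int => a.2 < b.2) (pvDedupAdj S) := by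
  cases S with
  | nil => simp [pvDedupAdj]
  | cons a t =>
    simp only [pvDedupAdj]
    exact List.pairwise_cons.mpr ⟨fun b hb => dedupGo_snd_gt h hb, dedupGo_pairwise h⟩

lemma dedupGo_complete {v : Int} : ∀ {prev : String × Int} {t : List (String × Int)},
    v ∈ t.map (·.2) → (∃ p ∈ pvDedupGo prev t, p.2 = v) ∨ v = prev.2 := by
  intro prev t
  induction t generalizing prev with
  | nil => intro h; simp at h
  | cons q t ih =>
    intro h
    simp only [pvDedupGo]
    have hsplit : v = q.2 ∨ v ∈ t.map (·.2) := by
      rcases List.mem_map.mp h with ⟨p, hp, hpv⟩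
      rcases List.mem_cons.mp hp with rfl | hpt
      · left; exact hpv.symm
      · right; exact List.mem_map.mpr ⟨p, hpt, hpv⟩
    rcases hsplit with hvq | hvt
    · by_cases hne : q.2 ≠ prev.2
      · left; exact ⟨q, by simp [hne], hvq.symm⟩
      · right; rw [hvq]; exact not_not.mp hne
    · rcases @ih q hvt with ⟨r, hr, hrv⟩ | hvq
      · left
        refine ⟨r, ?_, hrv⟩
        split
        · exact List.mem_cons_of_mem _ hr
        · exact hr
      · by_cases hne : q.2 ≠ prev.2
        · left; exact ⟨q, by simp [hne], hvq.symm⟩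
        · right; rw [hvq]; exact not_not.mp hne

lemma dedupAdj_complete {v : Int} {S : List (String × Int)}
    (h : v ∈ S.map (·.2)) : ∃ p ∈ pvDedupAdj S, p.2 = v := by
  cases S with
  | nil => simp at h
  | cons a t =>
    simp only [pvDedupAdj]
    rcases List.mem_map.mp h with ⟨p, hp, hpv⟩
    rcases List.mem_cons.mp hp with rfl | hpt
    · exact ⟨p, List.mem_cons_self, hpv⟩
    · rcases dedupGo_complete (prev := a) (List.mem_map.mpr ⟨p, hpt, hpv⟩) with ⟨r, hr, hrv⟩ | hva
      · exact ⟨r, List.mem_cons_of_mem _ hr, hrv⟩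
      · exact ⟨a, List.mem_cons_self, hva.symm⟩

lemma dedupGo_min {p : String × Int} : ∀ {prev : String × Int} {t : List (String × Int)},
    List.Pairwise (fun a b => pvKey3 a ≤ pvKey3 b) (prev :: t) →
    p ∈ pvDedupGo prev t → ∀ q ∈ t, q.2 = p.2 → pvKey3 p ≤ pvKey3 q := by
  intro prev t
  induction t generalizing prev with
  | nil => intro _ h; simp [pvDedupGo] at h
  | cons q0 t ih =>
    intro hpw h q hq hqv
    rcases List.pairwise_cons.mp hpw with ⟨_, hq0t⟩
    have hle2 : List.Pairwise (fun a b : String × Int => a.2 ≤ b.2) (q0 :: t) :=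
      hq0t.imp (fun h => pvKey3_snd_le h)
    simp only [pvDedupGo] at h
    have hgo : p ∈ pvDedupGo q0 t → pvKey3 p ≤ pvKey3 q := by
      intro hmem
      rcases List.mem_cons.mp hq with rfl | hqt
      · exact absurd hqv (ne_of_lt (dedupGo_snd_gt hle2 hmem))
      · exact ih hq0t hmem q hqt hqv
    split at h
    · rcases List.mem_cons.mp h with rfl | hmem
      · rcases List.mem_cons.mp hq with rfl | hqt
        · exact le_refl _
        · exact (List.pairwise_cons.mp hq0t).1 q hqt
      · exact hgo hmem
    · exact hgo h

lemma dedupAdj_min {p : String × Int} {S : List (String × Int)}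
    (hpw : List.Pairwise (fun a b => pvKey3 a ≤ pvKey3 b) S)
    (h : p ∈ pvDedupAdj S) : ∀ q ∈ S, q.2 = p.2 → pvKey3 p ≤ pvKey3 q := by
  cases S with
  | nil => simp [pvDedupAdj] at h
  | cons a t =>
    intro q hq hqv
    have hle2 : List.Pairwise (fun a b : String × Int => a.2 ≤ b.2) (a :: t) :=
      hpw.imp (fun h => pvKey3_snd_le h)
    simp only [pvDedupAdj] at h
    rcases List.mem_cons.mp h with rfl | hmem
    · rcases List.mem_cons.mp hq with rfl | hqt
      · exact le_refl _
      · exact (List.pairwise_cons.mp hpw).1 q hqt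
    · rcases List.mem_cons.mp hq with rfl | hqt
      · exact absurd hqv (ne_of_lt (dedupGo_snd_gt hle2 hmem))
      · exact dedupGo_min hpw hmem q hqt hqv

-- ---------- running minimum (B side) ----------

lemma pvMinStep_some {v : Int} {acc : Option String} {p : String × Int} (hp : p.2 = v) :
    ∃ m, pvMinStep v acc p = some m := by
  simp only [pvMinStep, if_pos hp]
  cases acc with
  | none => exact ⟨_, rfl⟩
  | some c =>
    by_cases hlt : pvKey2 p.1 < pvKey2 c
    · exact ⟨p.1, by simp [hlt]⟩
    · exact ⟨c, by simp [hlt]⟩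

lemma foldl_minStep_none {v : Int} : ∀ (F : List (String × Int)) (acc : Option String),
    (F.foldl (pvMinStep v) acc = none ↔ acc = none ∧ ∀ p ∈ F, p.2 ≠ v) := by
  intro F
  induction F with
  | nil => intro acc; simp
  | cons p t ih =>
    intro acc
    simp only [List.foldl_cons, ih]
    constructor
    · rintro ⟨hstep, ht⟩
      by_cases hp : p.2 = v
      · exfalso
        rcases pvMinStep_some (acc := acc) hp with ⟨m, hm⟩
        rw [hm] at hstep; simp at hstep
      · simp only [pvMinStep, if_neg hp] at hstep
        exact ⟨hstep, by simpa [hp] using ht⟩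
    · rintro ⟨hacc, hall⟩
      have hp : p.2 ≠ v := hall p List.mem_cons_self
      simp only [pvMinStep, if_neg hp]
      exact ⟨hacc, fun q hq => hall q (List.mem_cons_of_mem _ hq)⟩

lemma foldl_minStep_mem {v : Int} {n : String} : ∀ {F : List (String × Int)} {acc : Option String},
    F.foldl (pvMinStep v) acc = some n → acc = some n ∨ (n, v) ∈ F := by
  intro F
  induction F with
  | nil => intro acc h; left; simpa using h
  | cons p t ih =>
    intro acc h
    simp only [List.foldl_cons] at h
    rcases ih h with hstep | hmem
    · by_cases hp : p.2 = v
      · cases acc with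
        | none =>
          simp only [pvMinStep, if_pos hp] at hstep
          right
          have hn : p.1 = n := by simpa using hstep
          rw [← hn, ← hp]; simp
        | some c =>
          by_cases hlt : pvKey2 p.1 < pvKey2 c
          · simp only [pvMinStep, if_pos hp, if_pos hlt] at hstep
            right
            have hn : p.1 = n := by simpa using hstep
            rw [← hn, ← hp]; simp
          · simp only [pvMinStep, if_pos hp, if_neg hlt] at hstep
            left; exact hstep
      · simp only [pvMinStep, if_neg hp] at hstep
        left; exact hstep
    · right; exact List.mem_cons_of_mem _ hmem

lemma foldl_minStep_le_acc {v : Int} {n : String} : ∀ {F : List (String × Int)}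
    {acc : Option String} {c : String},
    F.foldl (pvMinStep v) acc = some n → acc = some c → pvKey2 n ≤ pvKey2 c := by
  intro F
  induction F with
  | nil =>
    intro acc c h hacc
    subst hacc
    have : c = n := by simpa using h
    simp [this]
  | cons p t ih =>
    intro acc c h hacc
    subst hacc
    simp only [List.foldl_cons] at h
    by_cases hp : p.2 = v
    · by_cases hlt : pvKey2 p.1 < pvKey2 c
      · simp only [pvMinStep, if_pos hp, if_pos hlt] at h
        exact le_trans (ih h rfl) (le_of_lt hlt)
      · simp only [pvMinStep, if_pos hp, if_neg hlt] at h
        exact ih h rfl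
    · simp only [pvMinStep, if_neg hp] at h
      exact ih h rfl

lemma foldl_minStep_le {v : Int} {n : String} : ∀ {F : List (String × Int)} {acc : Option String},
    F.foldl (pvMinStep v) acc = some n → ∀ q ∈ F, q.2 = v → pvKey2 n ≤ pvKey2 q.1 := by
  intro F
  induction F with
  | nil => intro acc _ q hq; simp at hq
  | cons p t ih =>
    intro acc h q hq hqv
    simp only [List.foldl_cons] at h
    rcases List.mem_cons.mp hq with rfl | hqt
    · cases acc with
      | none =>
        simp only [pvMinStep, if_pos hqv] at h
        exact foldl_minStep_le_acc h rfl
      | some c =>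
        by_cases hlt : pvKey2 q.1 < pvKey2 c
        · simp only [pvMinStep, if_pos hqv, if_pos hlt] at h
          exact foldl_minStep_le_acc h rfl
        · simp only [pvMinStep, if_pos hqv, if_neg hlt] at h
          exact le_trans (foldl_minStep_le_acc h rfl) (le_of_not_gt hlt)
    · exact ih h q hqt hqv

-- ---------- the best dict (B side) ----------

lemma foldl_bestStep_get? (v : Int) : ∀ (l : List (String × Int)) (d : PySem.Dict Int String),
    (l.foldl pvBestStep d).get? v =
      (l.filter (fun p => pvInRange p.2)).foldl (pvMinStep v) (d.get? v) := by
  intro l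
  induction l with
  | nil => intro d; simp
  | cons p t ih =>
    intro d
    simp only [List.foldl_cons, List.filter_cons]
    by_cases hr : pvInRange p.2
    · simp only [if_pos hr, List.foldl_cons]
      have hstep : (pvBestStep d p).get? v = pvMinStep v (d.get? v) p := by
        simp only [pvBestStep, if_pos hr]
        by_cases hv : p.2 = v
        · subst hv
          cases hget : d.get? p.2 with
          | none => simp [pvMinStep, hget, PySem.Dict.get?_insert]
          | some c =>
            by_cases hlt : pvKey2 p.1 < pvKey2 c
            · simp [pvMinStep, hget, hlt, PySem.Dict.get?_insert]
            · simp [pvMinStep, hget, hlt]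
        · have hv2 : v ≠ p.2 := fun he => hv he.symm
          cases hget : d.get? p.2 with
          | none => simp [pvMinStep, hget, PySem.Dict.get?_insert, hv2, hv]
          | some c =>
            by_cases hlt : pvKey2 p.1 < pvKey2 c
            · simp [pvMinStep, hget, hlt, PySem.Dict.get?_insert, hv2, hv]
            · simp [pvMinStep, hget, hlt, hv]
      rw [ih, hstep]
    · have hr' : pvInRange p.2 = false := by simpa using hr
      simp only [hr']
      have hstep : pvBestStep d p = d := by simp [pvBestStep, hr']
      rw [hstep, ih]
      simp

lemma pvBest_get? (lst : List (String × Int)) (v : Int) :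
    (pvBest lst).get? v = pvMinF (pvF lst) v := by
  unfold pvBest pvMinF pvF
  rw [foldl_bestStep_get?]
  simp

lemma nodup_keys_foldl_bestStep : ∀ (l : List (String × Int)) (d : PySem.Dict Int String),
    d.keys.Nodup → (l.foldl pvBestStep d).keys.Nodup := by
  intro l
  induction l with
  | nil => intro d h; simpa using h
  | cons p t ih =>
    intro d h
    simp only [List.foldl_cons]
    apply ih
    unfold pvBestStep
    split
    · cases d.get? p.2 with
      | none => exact PySem.Dict.nodup_keys_insert _ _ _ h
      | some c =>
        show (if pvKey2 p.1 < pvKey2 c then d.insert p.2 p.1 else d).keys.Nodup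
        by_cases hlt : pvKey2 p.1 < pvKey2 c
        · rw [if_pos hlt]; exact PySem.Dict.nodup_keys_insert _ _ _ h
        · rw [if_neg hlt]; exact h
    · exact h

lemma pvBest_keys_nodup (lst : List (String × Int)) : (pvBest lst).keys.Nodup := by
  unfold pvBest
  exact nodup_keys_foldl_bestStep _ _ PySem.Dict.nodup_keys_empty

lemma mem_pvBest_keys_iff (lst : List (String × Int)) (v : Int) :
    v ∈ (pvBest lst).keys ↔ ∃ p ∈ pvF lst, p.2 = v := by
  constructor
  · intro h
    have hne : (pvBest lst).get? v ≠ none :=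
      fun hnone => ((PySem.Dict.get?_eq_none_iff_not_mem_keys _ _).mp hnone) h
    rw [pvBest_get?] at hne
    cases hmf : pvMinF (pvF lst) v with
    | none => exact absurd hmf hne
    | some n =>
      rcases foldl_minStep_mem hmf with hacc | hmem
      · simp at hacc
      · exact ⟨(n, v), hmem, rfl⟩
  · rintro ⟨p, hp, hpv⟩
    by_contra h
    have : (pvBest lst).get? v = none := (PySem.Dict.get?_eq_none_iff_not_mem_keys _ _).mpr h
    rw [pvBest_get?] at this
    exact ((foldl_minStep_none _ _).mp this).2 p hp hpv

lemma pvBest_items_nil_iff (lst : List (String × Int)) :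
    ((pvBest lst).items = [] ↔ pvF lst = []) := by
  constructor
  · intro h
    cases hF : pvF lst with
    | nil => rfl
    | cons p t =>
      exfalso
      have hk : p.2 ∈ (pvBest lst).keys :=
        (mem_pvBest_keys_iff lst p.2).mpr ⟨p, by rw [hF]; exact List.mem_cons_self, rfl⟩
      have : (pvBest lst).keys = [] := by simp [PySem.Dict.keys, h]
      rw [this] at hk; simp at hk
  · intro h
    cases hI : (pvBest lst).items with
    | nil => rfl
    | cons q t =>
      exfalso
      have hk : q.1 ∈ (pvBest lst).keys := by simp [PySem.Dict.keys, hI]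
      rcases (mem_pvBest_keys_iff lst q.1).mp hk with ⟨p, hp, _⟩
      rw [h] at hp; simp at hp

-- ---------- per-group equality ----------

lemma pvBest_getD_of_mem_dedup {lst : List (String × Int)} {p : String × Int}
    (h : p ∈ pvDedupAdj (PySem.List.sorted (pvF lst) pvKey3 false)) :
    (pvBest lst).getD p.2 "" = p.1 := by
  have hS := PySem.List.sorted_perm (pvF lst) pvKey3 false
  have hpF : p ∈ pvF lst := hS.mem_iff.mp (mem_dedupAdj h)
  have hpw : List.Pairwise (fun a b => pvKey3 a ≤ pvKey3 b)
      (PySem.List.sorted (pvF lst) pvKey3 false) := PySem.List.sorted_pairwise _ _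
  cases hmf : pvMinF (pvF lst) p.2 with
  | none => exact absurd rfl (((foldl_minStep_none _ _).mp hmf).2 p hpF)
  | some n =>
    have hmem : (n, p.2) ∈ pvF lst := by
      rcases foldl_minStep_mem hmf with hacc | hmem
      · simp at hacc
      · exact hmem
    have h1 : pvKey2 n ≤ pvKey2 p.1 := foldl_minStep_le hmf p hpF rfl
    have h2 : pvKey2 p.1 ≤ pvKey2 n := by
      have := dedupAdj_min hpw h (n, p.2) (hS.mem_iff.mpr hmem) rfl
      exact pvKey3_key2_le this rfl
    have hn : n = p.1 := pvKey2_inj (le_antisymm h1 h2)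
    rw [PySem.Dict.getD_eq_get?_getD, pvBest_get?, hmf, hn]
    rfl

lemma pvSortedKeys_eq (lst : List (String × Int)) :
    PySem.List.sorted (pvBest lst).keys (fun v => v) false =
      (pvDedupAdj (PySem.List.sorted (pvF lst) pvKey3 false)).map (·.2) := by
  have hS := PySem.List.sorted_perm (pvF lst) pvKey3 false
  have hpw3 : List.Pairwise (fun a b => pvKey3 a ≤ pvKey3 b)
      (PySem.List.sorted (pvF lst) pvKey3 false) := PySem.List.sorted_pairwise _ _
  have hpwlt : List.Pairwise (fun a b : String × Int => a.2 < b.2)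
      (pvDedupAdj (PySem.List.sorted (pvF lst) pvKey3 false)) :=
    dedupAdj_pairwise (hpw3.imp (fun h => pvKey3_snd_le h))
  apply PySem.List.sorted_eq_of_perm_of_pairwise_lt
  · have hndK : (pvBest lst).keys.Nodup := pvBest_keys_nodup lst
    have hndD : ((pvDedupAdj (PySem.List.sorted (pvF lst) pvKey3 false)).map (·.2)).Nodup :=
      List.pairwise_map.mpr (hpwlt.imp (fun h => ne_of_lt h))
    rw [List.perm_ext_iff_of_nodup hndD hndK]
    intro v
    rw [mem_pvBest_keys_iff]
    constructor
    · intro hv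
      rcases List.mem_map.mp hv with ⟨p, hp, hpv⟩
      exact ⟨p, hS.mem_iff.mp (mem_dedupAdj hp), hpv⟩
    · rintro ⟨p, hp, hpv⟩
      have : v ∈ (PySem.List.sorted (pvF lst) pvKey3 false).map (·.2) :=
        List.mem_map.mpr ⟨p, hS.mem_iff.mpr hp, hpv⟩
      rcases dedupAdj_complete this with ⟨r, hr, hrv⟩
      exact List.mem_map.mpr ⟨r, hr, hrv⟩
  · exact List.pairwise_map.mpr hpwlt

lemma pvGroup_eq (api : String) (gi : String × List (String × Int)) :
    pvProcB api gi = Option.map (fun r => pvGroupCase api r.1 r.2) (pvProcA gi) := by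
  unfold pvProcB pvProcA
  by_cases hF : pvF gi.2 = []
  · rw [if_pos ((pvBest_items_nil_iff gi.2).mpr hF), if_pos hF]; rfl
  · rw [if_neg (fun h => hF ((pvBest_items_nil_iff gi.2).mp h)), if_neg hF]
    simp only [Option.map_some]
    have hstr : (PySem.List.sorted (pvBest gi.2).keys (fun v => v) false).map
          (fun v => pvValueCase ("0x" ++ pvHex v) ("\"" ++ (pvBest gi.2).getD v "" ++ "\""))
        = (pvDedupAdj (PySem.List.sorted (pvF gi.2) pvKey3 false)).map pvFmtCase := by
      rw [pvSortedKeys_eq, List.map_map]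
      apply List.map_congr_left
      intro p hp
      have hg := pvBest_getD_of_mem_dedup (lst := gi.2) hp
      simp only [Function.comp, pvFmtCase, hg]
    rw [hstr]

lemma pvProcA_none_iff (gi : String × List (String × Int)) :
    pvProcA gi = none ↔ pvF gi.2 = [] := by
  unfold pvProcA; split <;> simp_all

lemma pvProcA_fst {gi : String × List (String × Int)} {r : String × String}
    (h : pvProcA gi = some r) : r.1 = gi.1 := by
  unfold pvProcA at h
  split at h
  · simp at h
  · cases h; rfl

lemma pvFoldA_eq : ∀ (l : List (String × List (String × Int))) (acc : List (String × String)),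
    l.foldl (fun acc gi =>
      let string_value_pairs := (PySem.Dict.ofList gi.2).items.filter (fun x => pvInRange x.2)
      if string_value_pairs = [] then acc
      else
        acc ++ [(gi.1, PySem.Str.join "\n"
          ((pvDedupAdj (PySem.List.sorted string_value_pairs (fun x => toLex (x.2, pvKey2 x.1)) false)).map
            (fun p => pvValueCase ("0x" ++ pvHex p.2) ("\"" ++ p.1 ++ "\""))))]) acc
      = acc ++ l.filterMap pvProcA := by
  intro l
  induction l with
  | nil => intro acc; simp
  | cons gi t ih =>
    intro acc
    simp only [List.foldl_cons]
    rw [ih, List.filterMap_cons]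
    cases hP : pvProcA gi with
    | none =>
      have hF : pvF gi.2 = [] := (pvProcA_none_iff gi).mp hP
      show (if pvF gi.2 = [] then acc else _) ++ _ = _
      rw [if_pos hF]
    | some r =>
      have hF : ¬ pvF gi.2 = [] := by
        intro h
        rw [(pvProcA_none_iff gi).mpr h] at hP
        simp at hP
      have hr : r = (gi.1, PySem.Str.join "\n"
          ((pvDedupAdj (PySem.List.sorted (pvF gi.2) pvKey3 false)).map pvFmtCase)) := by
        unfold pvProcA at hP
        rw [if_neg hF] at hP
        exact (Option.some_inj.mp hP).symm
      show (if pvF gi.2 = [] then acc else acc ++ [(gi.1, _)]) ++ _ = _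
      rw [if_neg hF, hr, List.append_assoc]
      rfl

lemma pvFoldB_eq (api : String) :
    ∀ (l : List (String × List (String × Int))) (acc : List String),
    l.foldl (fun parts gi =>
      let best := (PySem.Dict.ofList gi.2).items.foldl (fun best p =>
        if pvInRange p.2 then
          match best.get? p.2 with
          | none => best.insert p.2 p.1
          | some cur => if pvKey2 p.1 < pvKey2 cur then best.insert p.2 p.1 else best
        else best) PySem.Dict.empty
      if best.items = [] then parts
      else parts ++ [pvGroupCase api gi.1 (PySem.Str.join "\n"
        ((PySem.List.sorted best.keys (fun v => v) false).map
          (fun v => pvValueCase ("0x" ++ pvHex v) ("\"" ++ best.getD v "" ++ "\""))))]) acc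
      = acc ++ l.filterMap (pvProcB api) := by
  intro l
  induction l with
  | nil => intro acc; simp
  | cons gi t ih =>
    intro acc
    simp only [List.foldl_cons]
    rw [ih, List.filterMap_cons]
    cases hP : pvProcB api gi with
    | none =>
      have hB : (pvBest gi.2).items = [] := by
        unfold pvProcB at hP
        by_cases h : (pvBest gi.2).items = []
        · exact h
        · rw [if_neg h] at hP; simp at hP
      show (if (pvBest gi.2).items = [] then acc else _) ++ _ = _
      rw [if_pos hB]
    | some r =>
      have hB : ¬ (pvBest gi.2).items = [] := by
        intro h
        unfold pvProcB at hP
        rw [if_pos h] at hP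
        simp at hP
      have hr : r = pvGroupCase api gi.1 (PySem.Str.join "\n"
          ((PySem.List.sorted (pvBest gi.2).keys (fun v => v) false).map
            (fun v => pvValueCase ("0x" ++ pvHex v) ("\"" ++ (pvBest gi.2).getD v "" ++ "\"")))) := by
        unfold pvProcB at hP
        rw [if_neg hB] at hP
        exact (Option.some_inj.mp hP).symm
      show (if (pvBest gi.2).items = [] then acc else acc ++ [_]) ++ _ = _
      rw [if_neg hB, hr, List.append_assoc]
      rfl

lemma pvPairwise_lt_filterMap_procA : ∀ {l : List (String × List (String × Int))},
    l.Pairwise (fun a b => a.1 < b.1) →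
    (l.filterMap pvProcA).Pairwise (fun a b => a.1 < b.1) := by
  intro l
  induction l with
  | nil => intro _; simp
  | cons a t ih =>
    intro h
    rcases List.pairwise_cons.mp h with ⟨ha, ht⟩
    rw [List.filterMap_cons]
    cases hp : pvProcA a with
    | none => exact ih ht
    | some r =>
      refine List.pairwise_cons.mpr ⟨?_, ih ht⟩
      intro b hb
      rcases List.mem_filterMap.mp hb with ⟨x, hx, hfx⟩
      rw [pvProcA_fst hfx, pvProcA_fst hp]
      exact ha x hx

lemma pvSorted_comm (G : List (String × List (String × Int)))
    (hnd : (G.map (·.1)).Nodup) :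
    PySem.List.sorted (G.filterMap pvProcA) (fun x => x.1) false
      = (PySem.List.sorted G (fun x => x.1) false).filterMap pvProcA := by
  apply PySem.List.sorted_eq_of_perm_of_pairwise_lt
  · exact List.Perm.filterMap _ (PySem.List.sorted_perm G _ false)
  · have hle := PySem.List.sorted_pairwise G (fun x => x.1)
    have hnd' : ((PySem.List.sorted G (fun x => x.1) false).map (·.1)).Nodup :=
      (((PySem.List.sorted_perm G _ false)).map (·.1)).nodup_iff.mpr hnd
    have hne : (PySem.List.sorted G (fun x => x.1) false).Pairwise (fun a b => a.1 ≠ b.1) :=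
      List.pairwise_map.mp hnd'
    have hlt : (PySem.List.sorted G (fun x => x.1) false).Pairwise (fun a b => a.1 < b.1) :=
      (hle.and hne).imp (fun h => lt_of_le_of_ne h.1 h.2)
    exact pvPairwise_lt_filterMap_procA hlt

-- ===== VERDICT (by name: the statement is the Claim_ definition above) =====
theorem dump_value_to_string_mapping_spec : Claim_equal_dump_value_to_string_mapping := by
  intro enum_groups api_enum _
  unfold Spec_dump_value_to_string_mapping
  simp only [dump_value_to_string_mapping, dump_value_to_string_mapping_alt]
  rw [pvFoldA_eq, pvFoldB_eq]
  simp only [List.nil_append]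
  have hnd : (((PySem.Dict.ofList enum_groups).items).map (·.1)).Nodup := by
    have := PySem.Dict.nodup_keys_ofList enum_groups
    simpa [PySem.Dict.keys] using this
  rw [pvSorted_comm _ hnd, List.map_filterMap]
  exact congrArg (PySem.Str.join "\n")
    (List.filterMap_congr (fun gi _ => (pvGroup_eq api_enum gi).symm))
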